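-- pv_equiv track=rewrite | github.com/shjeong92/dailyAlgorithm | 괄호변환.py | solution
-- ===== SOURCE A (Python) =====
-- def solution(p):
--     #v 가 빈 문자열일때 빠져나가줘야함.
--     if p == '':
--         return ''
--     oParen = 0
--     cParen = 0
--     idx = 0
--     isPerfect = True
--     pCheck = 0
--     for i in range(len(p)):
--         #괄호 열릴때 pCheck +=1 닫힐때 -=1 해준다 만약 이 pCheck이 음수값으로 내려간다면 불완전한 괄호이다.
--         if p[i] == '(':
--             oParen +=1
--             pCheck += 1
--         elif p[i] == ')':
--             cParen +=1
--             pCheck -= 1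
--         if pCheck<0:
--             isPerfect = False
--         # 균형잡힌문자열로 자르기위해 idx 값 저장.
--         if oParen == cParen:
--             idx = i
--             break
--     u = p[:idx+1]
--     v = p[idx+1:]
--
--     if isPerfect:
--         return u + solution(v)
--     #괄호방향을 뒤집는다는 말을 리스트로 만들어서 리버스 시킨다음 붙이라는 말인줄 착각하고 해맸다..
--     else:
--         u = list(u[1:-1])
--         for i in range(len(u)):
--             if u[i] == '(':
--                 u[i]= ')'
--             else:
--                 u[i] ='('
--         u = ''.join(u)
--         return '(' + solution(v) + ')' + u
-- ===== SOURCE B (Python) =====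
-- def solution(p):
--     # One linear-ish pass splits p into A's sequence of minimal "u" chunks
--     # (cut where '(' count equals ')' count; single leading char when the
--     # balance never returns to zero), then a right-to-left fold assembles
--     # the result without recursion.
--     chunks = []
--     start = 0
--     n = len(p)
--     while start < n:
--         bal = 0
--         cut = None
--         for i in range(start, n):
--             if p[i] == '(':
--                 bal += 1
--             elif p[i] == ')':
--                 bal -= 1
--             if bal == 0:
--                 cut = i
--                 break
--         if cut is None:
--             chunks.append(p[start:start + 1])
--             start += 1
--         else:
--             chunks.append(p[start:cut + 1])
--             start = cut + 1
--     res = ''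
--     for u in reversed(chunks):
--         if u[0] == ')':
--             inner = ''.join(')' if c == '(' else '(' for c in u[1:-1])
--             res = '(' + res + ')' + inner
--         else:
--             res = u + res
--     return res
-- ===== Notes on version B (the rewrite author's own statement) =====
-- stated objective: alternative
-- what changed: A's tail recursion (re-scan, cut u/v, recurse on v) is replaced by an explicit split of p into its list of minimal balanced chunks followed by a right-to-left fold that assembles the result with an accumulator.
import Mathlib
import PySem

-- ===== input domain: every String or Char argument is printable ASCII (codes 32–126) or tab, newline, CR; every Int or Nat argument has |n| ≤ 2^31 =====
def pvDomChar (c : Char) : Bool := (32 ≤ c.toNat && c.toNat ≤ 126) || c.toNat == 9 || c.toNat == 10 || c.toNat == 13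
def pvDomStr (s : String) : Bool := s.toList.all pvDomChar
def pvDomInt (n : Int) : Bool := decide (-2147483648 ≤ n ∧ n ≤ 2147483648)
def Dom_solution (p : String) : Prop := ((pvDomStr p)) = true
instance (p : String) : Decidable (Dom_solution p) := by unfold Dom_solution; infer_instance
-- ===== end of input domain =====

-- B replaces A's tail recursion by an explicit chunk split plus a right-to-left fold (alternative decomposition, same cost class).

-- ===== PORT A =====
-- the 'for i in range(len(p))' loop of A: state (i, oParen, cParen, idx, isPerfect, pCheck);
-- returns (idx, isPerfect) either at the break or after the loop ends.
def aLoop : List Char → Nat → Int → Int → Nat → Bool → Int → (Nat × Bool)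
  | [], _, _, _, idx, isP, _ => (idx, isP)
  | c :: rest, i, o, cl, idx, isP, pc =>
    let o' := if c = '(' then o + 1 else o
    let cl' := if c = '(' then cl else if c = ')' then cl + 1 else cl
    let pc' := if c = '(' then pc + 1 else if c = ')' then pc - 1 else pc
    let isP' := if pc' < 0 then false else isP
    if o' = cl' then (i, isP')
    else aLoop rest (i + 1) o' cl' idx isP' pc'

-- A's flip of u[1:-1]: '(' becomes ')', every other char becomes '('
def aFlip (l : List Char) : List Char := l.map (fun c => if c = '(' then ')' else '(')

def solutionGo : List Char → List Char
  | [] => []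
  | c :: rest =>
    let r := aLoop (c :: rest) 0 0 0 0 true 0
    let u := (c :: rest).take (r.1 + 1)
    let v := (c :: rest).drop (r.1 + 1)
    if r.2 then u ++ solutionGo v
    else '(' :: (solutionGo v ++ ')' :: aFlip ((u.drop 1).dropLast))
termination_by l => l.length
decreasing_by all_goals (simp only [List.length_drop, List.length_cons]; omega)

def solution (p : String) : String := String.ofList (solutionGo p.toList)

-- ===== PORT B =====
-- inner scan of B: first index (counting from i) where the running balance returns to 0
def findZero : List Char → Int → Nat → Option Nat
  | [], _, _ => none
  | c :: rest, bal, i =>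
    let bal' := if c = '(' then bal + 1 else if c = ')' then bal - 1 else bal
    if bal' = 0 then some i else findZero rest bal' (i + 1)

-- B's chunk list: cut at the first zero of the balance, else take a single char
def chunksB : List Char → List (List Char)
  | [] => []
  | c :: rest =>
    match findZero (c :: rest) 0 0 with
    | some i => (c :: rest).take (i + 1) :: chunksB ((c :: rest).drop (i + 1))
    | none => [c] :: chunksB rest
termination_by l => l.length
decreasing_by all_goals (simp only [List.length_drop, List.length_cons]; omega)

-- B's right-to-left accumulation step
def stepB (u : List Char) (res : List Char) : List Char :=
  if u.head? = some ')' then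
    '(' :: (res ++ ')' :: ((u.drop 1).dropLast).map (fun c => if c = '(' then ')' else '('))
  else u ++ res

def solution_alt (p : String) : String :=
  String.ofList ((chunksB p.toList).foldr stepB [])

-- ===== PRECONDITION & SPEC =====
def Spec_solution (p : String) (out : String) : Prop := out = solution_alt p
instance (p : String) (out : String) : Decidable (Spec_solution p out) := by unfold Spec_solution; infer_instance

-- ===== CLAIM (what is proved, stated in full; the proofs are below) =====
def Claim_equal_solution : Prop := ∀ (p : String), Dom_solution p → Spec_solution p (solution p)

-- ===== LEMMAS AND PROOFS =====

-- A's break index equals B's findZero result (default 0 when the balance never returns to zero)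
lemma aLoop_fst (l : List Char) : ∀ (i : Nat) (o cl : Int) (idx : Nat) (isP : Bool) (pc : Int),
    pc = o - cl → (aLoop l i o cl idx isP pc).1 = (findZero l pc i).getD idx := by
  induction l with
  | nil => intro i o cl idx isP pc h; simp [aLoop, findZero]
  | cons c rest ih =>
    intro i o cl idx isP pc h
    by_cases h1 : c = '('
    · subst h1
      simp only [aLoop, findZero, Char.reduceEq, reduceIte]
      by_cases hz : pc + 1 = 0
      · have ho : o + 1 = cl := by omega
        simp [hz, ho]
      · have ho : ¬ o + 1 = cl := by omega
        rw [if_neg ho, if_neg hz]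
        simp only [Option.getD]
        exact ih _ _ _ _ _ _ (by omega)
    · by_cases h2 : c = ')'
      · subst h2
        simp only [aLoop, findZero, Char.reduceEq, reduceIte]
        by_cases hz : pc - 1 = 0
        · have ho : o = cl + 1 := by omega
          simp [hz, ho]
        · have ho : ¬ o = cl + 1 := by omega
          rw [if_neg ho, if_neg hz]
          simp only [Option.getD]
          exact ih _ _ _ _ _ _ (by omega)
      · simp only [aLoop, findZero, if_neg h1, if_neg h2]
        by_cases hz : pc = 0
        · have ho : o = cl := by omega
          simp [hz, ho]
        · have ho : ¬ o = cl := by omega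
          rw [if_neg ho, if_neg hz]
          simp only [Option.getD]
          exact ih _ _ _ _ _ _ (by omega)

-- once isPerfect is false it stays false
lemma aLoop_snd_false (l : List Char) : ∀ (i : Nat) (o cl : Int) (idx : Nat) (pc : Int),
    (aLoop l i o cl idx false pc).2 = false := by
  induction l with
  | nil => intro i o cl idx pc; simp [aLoop]
  | cons c rest ih =>
    intro i o cl idx pc
    by_cases h1 : c = '('
    · subst h1
      simp only [aLoop, Char.reduceEq, reduceIte, ite_self]
      split
      · rfl
      · exact ih _ _ _ _ _
    · by_cases h2 : c = ')'
      · subst h2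
        simp only [aLoop, Char.reduceEq, reduceIte, ite_self]
        split
        · rfl
        · exact ih _ _ _ _ _
      · simp only [aLoop, if_neg h1, if_neg h2, ite_self]
        split
        · rfl
        · exact ih _ _ _ _ _

-- while the balance stays positive isPerfect stays true
lemma aLoop_snd_pos (l : List Char) : ∀ (i : Nat) (o cl : Int) (idx : Nat) (pc : Int),
    pc = o - cl → 1 ≤ pc → (aLoop l i o cl idx true pc).2 = true := by
  induction l with
  | nil => intro i o cl idx pc h hp; simp [aLoop]
  | cons c rest ih =>
    intro i o cl idx pc h hp
    by_cases h1 : c = '('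
    · subst h1
      simp only [aLoop, Char.reduceEq, reduceIte]
      have hnneg : ¬ (pc + 1 < 0) := by omega
      have hne : ¬ (o + 1 = cl) := by omega
      rw [if_neg hnneg, if_neg hne]
      exact ih _ _ _ _ _ (by omega) (by omega)
    · by_cases h2 : c = ')'
      · subst h2
        simp only [aLoop, Char.reduceEq, reduceIte]
        have hnneg : ¬ (pc - 1 < 0) := by omega
        rw [if_neg hnneg]
        by_cases hz : o = cl + 1
        · simp [hz]
        · rw [if_neg hz]
          exact ih _ _ _ _ _ (by omega) (by omega)
      · simp only [aLoop, if_neg h1, if_neg h2]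
        have hnneg : ¬ (pc < 0) := by omega
        have hne : ¬ (o = cl) := by omega
        rw [if_neg hnneg, if_neg hne]
        exact ih _ _ _ _ _ h hp

-- A's isPerfect flag on the full scan is: the first character is not ')'
lemma aLoop_snd_head (c : Char) (rest : List Char) :
    (aLoop (c :: rest) 0 0 0 0 true 0).2 = (decide (c ≠ ')')) := by
  by_cases h1 : c = '('
  · subst h1
    simp only [aLoop, Char.reduceEq, reduceIte]
    norm_num
    exact aLoop_snd_pos rest 1 1 0 0 1 (by omega) (by omega)
  · by_cases h2 : c = ')'
    · subst h2
      simp only [aLoop, Char.reduceEq, reduceIte]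
      norm_num
      exact aLoop_snd_false rest 1 0 1 0 (-1)
    · simp [aLoop, h1, h2]

-- main induction: A's recursion computes exactly B's right fold over the chunk list
lemma solutionGo_eq_foldr : ∀ (n : Nat) (l : List Char), l.length ≤ n →
    solutionGo l = (chunksB l).foldr stepB [] := by
  intro n
  induction n with
  | zero =>
    intro l hl
    have : l = [] := by
      cases l with
      | nil => rfl
      | cons c rest => simp at hl
    subst this; simp [solutionGo, chunksB]
  | succ n ih =>
    intro l hl
    cases l with
    | nil => simp [solutionGo, chunksB]
    | cons c rest =>
      have hfst := aLoop_fst (c :: rest) 0 0 0 0 true 0 (by omega)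
      have hsnd := aLoop_snd_head c rest
      simp only [solutionGo, chunksB]
      cases hfz : findZero (c :: rest) 0 0 with
      | some i =>
        rw [hfz] at hfst
        simp only [Option.getD] at hfst
        have hrec := ih ((c :: rest).drop (i + 1))
          (by simp only [List.length_drop, List.length_cons]; simp at hl; omega)
        simp only [List.foldr_cons]
        rw [hfst, hrec]
        by_cases hc : c = ')'
        · subst hc
          rw [show (aLoop (')' :: rest) 0 0 0 0 true 0).2 = false by simp [hsnd]]
          simp [stepB, aFlip, List.map_take, List.map_dropLast]
        · rw [show (aLoop (c :: rest) 0 0 0 0 true 0).2 = true by simp [hsnd, hc]]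
          simp [stepB, hc]
      | none =>
        rw [hfz] at hfst
        simp only [Option.getD] at hfst
        have hrec := ih rest (by simp at hl; omega)
        simp only [List.foldr_cons]
        rw [hfst]
        simp only [List.take_succ_cons, List.take_zero, List.drop_succ_cons, List.drop_zero]
        rw [hrec]
        by_cases hc : c = ')'
        · subst hc
          rw [show (aLoop (')' :: rest) 0 0 0 0 true 0).2 = false by simp [hsnd]]
          simp [stepB, aFlip]
        · rw [show (aLoop (c :: rest) 0 0 0 0 true 0).2 = true by simp [hsnd, hc]]
          simp [stepB, hc]

-- ===== VERDICT (by name: the statement is the Claim_ definition above) =====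
theorem solution_spec : Claim_equal_solution := by
  intro p _
  unfold Spec_solution solution solution_alt
  rw [solutionGo_eq_foldr p.toList.length p.toList le_rfl]
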